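-- pv_equiv track=rewrite | github.com/chinudev/hacker | larryArray/larryArray.py | willItWork
-- ===== SOURCE A (Python) =====
-- def threeElemCheck(threeElemList):
--     if (len(threeElemList) == 3) and  \
--        (threeElemList in ([2,3,1], [3,1,2])):
--         return True
--     else:
--         return False
--
-- def willItWork(numList):
--     mismatchIndex = 0
--
--     match = True   # tracks if everything as matched so far
--     i=0
--     while (i < len(numList)):
--         if (i+1 != numList[i]):
--             if match == False:
--                 return False
--             match = False
--
--             if (i+3 > len(numList)):
--                 return False
--
--             # check if next 3
--             threeElemList = [numList[i]   - i,
--                              numList[i+1] - i,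
--                              numList[i+2] - i]
--             if threeElemCheck(threeElemList) == True:
--                 i += 2
--             else:
--                 return False
--
--         i += 1
--
--     return True
-- ===== SOURCE B (Python) =====
-- def willItWork(numList):
--     diffs = [i for i, v in enumerate(numList) if v != i + 1]
--     if not diffs:
--         return True
--     f = diffs[0]
--     return (diffs == [f, f + 1, f + 2]
--             and [numList[f] - f, numList[f + 1] - f, numList[f + 2] - f]
--                 in ([2, 3, 1], [3, 1, 2]))
-- ===== Notes on version B (the rewrite author's own statement) =====
-- stated objective: simpler
-- what changed: A's stateful while-loop with a match flag, index jumping and four early returns is replaced by a declarative characterisation: collect the out-of-place indices once and accept iff there are none, or exactly three consecutive ones whose values shifted by the first index form one of the two accepted 3-rotation patterns.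
import Mathlib
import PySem

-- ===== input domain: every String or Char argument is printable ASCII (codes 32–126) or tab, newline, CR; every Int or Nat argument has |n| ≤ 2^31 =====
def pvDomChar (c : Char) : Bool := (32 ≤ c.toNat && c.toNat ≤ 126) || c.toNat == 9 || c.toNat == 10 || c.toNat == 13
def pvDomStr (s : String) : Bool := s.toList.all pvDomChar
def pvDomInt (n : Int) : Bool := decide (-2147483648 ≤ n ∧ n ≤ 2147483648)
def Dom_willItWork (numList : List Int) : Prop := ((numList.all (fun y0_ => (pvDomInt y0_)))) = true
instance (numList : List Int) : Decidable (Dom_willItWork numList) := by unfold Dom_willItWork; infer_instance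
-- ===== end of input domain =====

-- B replaces A's stateful while-loop (match flag, index jump, early returns) by collecting
-- the out-of-place indices once and testing their shape; same values on every input.

-- ===== PORT A =====
def threeElemCheck (threeElemList : List Int) : Bool :=
  if threeElemList.length = 3 ∧
     (threeElemList = [2, 3, 1] ∨ threeElemList = [3, 1, 2]) then true else false

def willItWorkLoop (numList : List Int) (i : Nat) (mtch : Bool) : Bool :=
  if i < numList.length then
    if ((i : Int) + 1) ≠ numList.getD i 0 then
      if mtch = false then false
      else if numList.length < i + 3 then false
      else
        let threeElemList := [numList.getD i 0 - (i : Int),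
                              numList.getD (i + 1) 0 - (i : Int),
                              numList.getD (i + 2) 0 - (i : Int)]
        if threeElemCheck threeElemList = true then willItWorkLoop numList (i + 3) false
        else false
    else willItWorkLoop numList (i + 1) mtch
  else true
termination_by numList.length - i

def willItWork (numList : List Int) : Bool := willItWorkLoop numList 0 true

-- ===== PORT B =====
def willItWork_alt (numList : List Int) : Bool :=
  let diffs := ((PySem.List.enumerate numList).filter (fun p => p.2 != p.1 + 1)).map (·.1)
  match diffs with
  | [] => true
  | f :: _ =>
    (diffs == [f, f + 1, f + 2]) &&
    ([PySem.List.pyGetD numList f 0 - f,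
      PySem.List.pyGetD numList (f + 1) 0 - f,
      PySem.List.pyGetD numList (f + 2) 0 - f] == [2, 3, 1] ||
     [PySem.List.pyGetD numList f 0 - f,
      PySem.List.pyGetD numList (f + 1) 0 - f,
      PySem.List.pyGetD numList (f + 2) 0 - f] == [3, 1, 2])

-- ===== PRECONDITION & SPEC =====
def Spec_willItWork (numList : List Int) (out : Bool) : Prop := out = willItWork_alt numList
instance (numList : List Int) (out : Bool) : Decidable (Spec_willItWork numList out) := by unfold Spec_willItWork; infer_instance

-- ===== CLAIM (what is proved, stated in full; the proofs are below) =====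
def Claim_equal_willItWork : Prop := ∀ (numList : List Int), Dom_willItWork numList → Spec_willItWork numList (willItWork numList)

-- ===== LEMMAS AND PROOFS =====

-- the list of out-of-place indices of l from absolute position i on
def dfs (l : List Int) (i : Nat) : List Int :=
  if i < l.length then
    (if l.getD i 0 ≠ (i : Int) + 1 then ((i : Int)) :: dfs l (i + 1) else dfs l (i + 1))
  else []
termination_by l.length - i

-- structural version over a suffix
def dfsAux : List Int → Nat → List Int
  | [], _ => []
  | v :: r, i => if v ≠ (i : Int) + 1 then ((i : Int)) :: dfsAux r (i + 1) else dfsAux r (i + 1)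

def patB (l : List Int) (f : Int) : Bool :=
  [PySem.List.pyGetD l f 0 - f,
   PySem.List.pyGetD l (f + 1) 0 - f,
   PySem.List.pyGetD l (f + 2) 0 - f] == [2, 3, 1] ||
  [PySem.List.pyGetD l f 0 - f,
   PySem.List.pyGetD l (f + 1) 0 - f,
   PySem.List.pyGetD l (f + 2) 0 - f] == [3, 1, 2]

def bodyB (l : List Int) (d : List Int) : Bool :=
  match d with
  | [] => true
  | f :: _ => (d == [f, f + 1, f + 2]) && patB l f

theorem enumerate_filter_eq_dfsAux (l : List Int) (i : Nat) :
    ((PySem.List.enumerate l (i : Int)).filter (fun p => p.2 != p.1 + 1)).map (·.1)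
      = dfsAux l i := by
  induction l generalizing i with
  | nil => simp [dfsAux]
  | cons v r ih =>
    have hc : (i : Int) + 1 = ((i + 1 : Nat) : Int) := by push_cast; ring
    simp only [PySem.List.enumerate_cons, List.filter_cons]
    by_cases h : v = (i : Int) + 1
    · rw [if_neg (by simp [h]), hc, ih, dfsAux, if_neg (not_not_intro h)]
    · rw [if_pos (by simp [h]), List.map_cons, hc, ih, dfsAux, if_pos h]

theorem dfsAux_drop (l : List Int) (i : Nat) : dfsAux (l.drop i) i = dfs l i := by
  rw [dfs]
  by_cases h : i < l.length
  · rw [List.drop_eq_getElem_cons h]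
    have hg : l.getD i 0 = l[i] := List.getD_eq_getElem l 0 h
    simp only [dfsAux, hg, if_pos h]
    by_cases hv : l[i] = (i : Int) + 1 <;> simp [hv, dfsAux_drop l (i + 1)]
  · simp [List.drop_eq_nil_of_le (Nat.le_of_not_lt h), dfsAux, if_neg h]
termination_by l.length - i

theorem diffs_eq (l : List Int) :
    ((PySem.List.enumerate l).filter (fun p => p.2 != p.1 + 1)).map (·.1) = dfs l 0 := by
  have h := enumerate_filter_eq_dfsAux l 0
  have h2 := dfsAux_drop l 0
  rw [List.drop_zero] at h2
  rw [Nat.cast_zero] at h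
  rw [h, h2]

theorem alt_eq_bodyB (l : List Int) : willItWork_alt l = bodyB l (dfs l 0) := by
  simp only [willItWork_alt, diffs_eq]
  cases hd : dfs l 0 with
  | nil => simp [bodyB]
  | cons f rest => simp [bodyB, patB]

theorem loop_false_eq (l : List Int) (i : Nat) :
    willItWorkLoop l i false = (dfs l i == []) := by
  rw [willItWorkLoop, dfs]
  by_cases h : i < l.length
  · by_cases hv : l.getD i 0 = (i : Int) + 1
    · rw [if_pos h, if_pos h, if_neg (not_not_intro hv.symm), if_neg (not_not_intro hv)]
      exact loop_false_eq l (i + 1)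
    · rw [if_pos h, if_pos h, if_pos (fun e => hv e.symm), if_pos hv, if_pos rfl]
      simp
  · rw [if_neg h, if_neg h]
    rfl
termination_by l.length - i

-- pyGetD at a Nat-cast index is getD
theorem pyGetD_cast (l : List Int) (k : Nat) :
    PySem.List.pyGetD l ((k : Int)) 0 = l.getD k 0 := by
  simp [PySem.List.pyGetD_natCast]

theorem patB_cast (l : List Int) (i : Nat) :
    patB l ((i : Int)) =
      ([l.getD i 0 - (i : Int), l.getD (i + 1) 0 - (i : Int), l.getD (i + 2) 0 - (i : Int)]
          == [2, 3, 1] ||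
       [l.getD i 0 - (i : Int), l.getD (i + 1) 0 - (i : Int), l.getD (i + 2) 0 - (i : Int)]
          == [3, 1, 2]) := by
  have h1 : (i : Int) + 1 = ((i + 1 : Nat) : Int) := by push_cast; ring
  have h2 : (i : Int) + 2 = ((i + 2 : Nat) : Int) := by push_cast; ring
  unfold patB
  rw [h1, h2, pyGetD_cast, pyGetD_cast, pyGetD_cast]

theorem mem_dfs (l : List Int) (j : Nat) (x : Int) (hx : x ∈ dfs l j) :
    ∃ k : Nat, x = (k : Int) ∧ j ≤ k ∧ k < l.length := by
  rw [dfs] at hx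
  by_cases h : j < l.length
  · rw [if_pos h] at hx
    by_cases hv : l.getD j 0 ≠ (j : Int) + 1
    · rw [if_pos hv] at hx
      rcases List.mem_cons.mp hx with he | hm
      · exact ⟨j, he, le_refl _, h⟩
      · obtain ⟨k, hk1, hk2, hk3⟩ := mem_dfs l (j + 1) x hm
        exact ⟨k, hk1, by omega, hk3⟩
    · rw [if_neg hv] at hx
      obtain ⟨k, hk1, hk2, hk3⟩ := mem_dfs l (j + 1) x hx
      exact ⟨k, hk1, by omega, hk3⟩
  · rw [if_neg h] at hx
    exact absurd hx (List.not_mem_nil)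
termination_by l.length - j

theorem loop_true_eq (l : List Int) (i : Nat) :
    willItWorkLoop l i true = bodyB l (dfs l i) := by
  rw [willItWorkLoop, dfs]
  by_cases h : i < l.length
  · by_cases hv : l.getD i 0 = (i : Int) + 1
    · rw [if_pos h, if_pos h, if_neg (not_not_intro hv.symm), if_neg (not_not_intro hv)]
      exact loop_true_eq l (i + 1)
    · rw [if_pos h, if_pos h, if_pos (fun e => hv e.symm), if_pos hv,
          if_neg (show ¬((true : Bool) = false) by simp)]
      have hpc := patB_cast l i
      have htec : threeElemCheck [l.getD i 0 - (i : Int), l.getD (i + 1) 0 - (i : Int),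
          l.getD (i + 2) 0 - (i : Int)] = patB l ((i : Int)) := by
        rw [patB_cast]
        unfold threeElemCheck
        by_cases h1 : [l.getD i 0 - (i : Int), l.getD (i + 1) 0 - (i : Int),
            l.getD (i + 2) 0 - (i : Int)] = [2, 3, 1] <;>
          by_cases h2 : [l.getD i 0 - (i : Int), l.getD (i + 1) 0 - (i : Int),
              l.getD (i + 2) 0 - (i : Int)] = [3, 1, 2] <;>
            simp [h1, h2] <;> rfl
      by_cases h3 : l.length < i + 3
      · -- too close to the end: A returns False; B's diffs cannot be [i, i+1, i+2]
        rw [if_pos h3]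
        have hb : ((((i : Int)) :: dfs l (i + 1)) == [(i : Int), (i : Int) + 1, (i : Int) + 2])
            = false := by
          rw [beq_eq_false_iff_ne]
          intro he
          have hm : ((i : Int) + 2) ∈ dfs l (i + 1) := by
            have := List.cons.injEq (↑i) (dfs l (i + 1)) (↑i) [(i : Int) + 1, (i : Int) + 2]
                |>.mp he
            rw [this.2]
            simp
          obtain ⟨k, hk1, hk2, hk3⟩ := mem_dfs l (i + 1) _ hm
          omega
        simp [bodyB, hb]
      · rw [if_neg h3]
        simp only [htec]
        by_cases hp : patB l ((i : Int)) = true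
        · rw [if_pos hp, loop_false_eq l (i + 3)]
          have hor : ([l.getD i 0 - (i : Int), l.getD (i + 1) 0 - (i : Int),
              l.getD (i + 2) 0 - (i : Int)] = [2, 3, 1]) ∨
              ([l.getD i 0 - (i : Int), l.getD (i + 1) 0 - (i : Int),
              l.getD (i + 2) 0 - (i : Int)] = [3, 1, 2]) := by
            rw [hp] at hpc
            rcases Bool.or_eq_true_iff.mp hpc.symm with hc | hc
            · exact Or.inl (by exact_mod_cast beq_iff_eq.mp hc)
            · exact Or.inr (by exact_mod_cast beq_iff_eq.mp hc)
          have hm1 : l.getD (i + 1) 0 ≠ ((i + 1 : Nat) : Int) + 1 := by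
            rcases hor with hc | hc <;>
            · simp only [List.cons.injEq, and_true] at hc
              push_cast
              omega
          have hm2 : l.getD (i + 2) 0 ≠ ((i + 2 : Nat) : Int) + 1 := by
            rcases hor with hc | hc <;>
            · simp only [List.cons.injEq, and_true] at hc
              push_cast
              omega
          have h1 : i + 1 < l.length := by omega
          have h2 : i + 2 < l.length := by omega
          have hd : dfs l (i + 1) = ((i + 1 : Nat) : Int) :: ((i + 2 : Nat) : Int)
              :: dfs l (i + 3) := by
            rw [dfs, if_pos h1, if_pos hm1, dfs, if_pos h2, if_pos hm2]
          have c1 : ((i + 1 : Nat) : Int) = (i : Int) + 1 := by push_cast; ring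
          have c2 : ((i + 2 : Nat) : Int) = (i : Int) + 2 := by push_cast; ring
          simp [bodyB, hd, hp, c1, c2]
        · rw [if_neg hp]
          simp only [Bool.not_eq_true] at hp
          simp [bodyB, hp]
  · rw [if_neg h, if_neg h]
    rfl
termination_by l.length - i

-- ===== VERDICT (by name: the statement is the Claim_ definition above) =====
theorem willItWork_spec : Claim_equal_willItWork := by
  intro numList _
  unfold Spec_willItWork willItWork
  rw [loop_true_eq, alt_eq_bodyB]
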